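-- pv_equiv track=rewrite | github.com/C-Kernel-Engine/C-Kernel-Engine | version/v7/scripts/dataset/materialize_spec19_route_recovery_replay_v7.py | _filter_prompts
-- ===== SOURCE A (Python) =====
-- def _filter_prompts(prompts: list[str], forbidden: set[str]) -> tuple[list[str], list[str]]:
--     kept: list[str] = []
--     removed: list[str] = []
--     seen: set[str] = set()
--     for prompt in prompts:
--         text = str(prompt or "").strip()
--         if not text or text in seen:
--             continue
--         seen.add(text)
--         if text in forbidden:
--             removed.append(text)
--         else:
--             kept.append(text)
--     return kept, removed
-- ===== SOURCE B (Python) =====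
-- def _filter_prompts(prompts: list[str], forbidden: set[str]) -> tuple[list[str], list[str]]:
--     # one dedup pass building the ordered list of normalized non-empty texts,
--     # then two filter passes partitioning it by membership in forbidden
--     seen: set[str] = set()
--     texts: list[str] = []
--     for p in prompts:
--         t = str(p or "").strip()
--         if t and t not in seen:
--             seen.add(t)
--             texts.append(t)
--     kept = [t for t in texts if t not in forbidden]
--     removed = [t for t in texts if t in forbidden]
--     return kept, removed
-- ===== Notes on version B (the rewrite author's own statement) =====
-- stated objective: alternative
-- what changed: B replaces A's single routing loop (appending to kept/removed inside the dedup loop) by an order-preserving dedup pass building one intermediate list plus two separate filter comprehensions partitioning it by forbidden-membership.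
import Mathlib
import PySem

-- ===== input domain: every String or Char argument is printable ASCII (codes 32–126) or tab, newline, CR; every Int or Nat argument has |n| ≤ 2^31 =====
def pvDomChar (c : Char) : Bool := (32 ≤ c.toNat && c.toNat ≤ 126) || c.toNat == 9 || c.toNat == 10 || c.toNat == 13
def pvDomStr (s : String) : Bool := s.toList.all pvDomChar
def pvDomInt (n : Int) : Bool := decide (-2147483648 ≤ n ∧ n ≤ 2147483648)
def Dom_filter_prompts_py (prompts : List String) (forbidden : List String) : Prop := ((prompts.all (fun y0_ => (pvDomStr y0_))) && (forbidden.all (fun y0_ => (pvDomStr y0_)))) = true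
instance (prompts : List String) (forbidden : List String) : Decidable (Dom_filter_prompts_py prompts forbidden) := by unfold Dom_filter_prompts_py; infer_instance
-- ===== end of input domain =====

-- B replaces A's single routing loop by a dedup pass building one intermediate list
-- plus two separate filter passes partitioning it by forbidden-membership (alternative decomposition, same cost).


-- ===== PORT A =====
-- text = str(prompt or "").strip(): prompt is a str, so 'prompt or ""' is "" when prompt == "" and prompt otherwise
def pvNormA (prompt : String) : String :=
  PySem.Str.strip (if prompt = "" then "" else prompt)

-- the loop of A, carrying kept, removed and seen
def pvLoopA (prompts : List String) (forbidden : List String)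
    (kept removed : List String) (seen : PySem.Set String) : List String × List String :=
  match prompts with
  | [] => (kept, removed)
  | prompt :: rest =>
    let text := pvNormA prompt
    if text = "" || PySem.Set.contains seen text then
      pvLoopA rest forbidden kept removed seen
    else
      if forbidden.contains text then
        pvLoopA rest forbidden kept (removed ++ [text]) (PySem.Set.add seen text)
      else
        pvLoopA rest forbidden (kept ++ [text]) removed (PySem.Set.add seen text)

def filter_prompts_py (prompts : List String) (forbidden : List String) : List String × List String :=
  pvLoopA prompts forbidden [] [] PySem.Set.empty

-- ===== PORT B =====
-- dedup pass: ordered list of normalized non-empty texts, first occurrences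
def pvDedupB (prompts : List String) (seen : PySem.Set String) : List String :=
  match prompts with
  | [] => []
  | p :: rest =>
    let t := PySem.Str.strip (if p = "" then "" else p)
    if t ≠ "" && !(PySem.Set.contains seen t) then
      t :: pvDedupB rest (PySem.Set.add seen t)
    else
      pvDedupB rest seen

def filter_prompts_py_alt (prompts : List String) (forbidden : List String) : List String × List String :=
  let texts := pvDedupB prompts PySem.Set.empty
  (texts.filter (fun t => !forbidden.contains t), texts.filter (fun t => forbidden.contains t))

-- ===== PRECONDITION & SPEC =====
def Spec_filter_prompts_py (prompts : List String) (forbidden : List String) (out : List String × List String) : Prop := out = filter_prompts_py_alt prompts forbidden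
instance (prompts : List String) (forbidden : List String) (out : List String × List String) : Decidable (Spec_filter_prompts_py prompts forbidden out) := by unfold Spec_filter_prompts_py; infer_instance

-- ===== CLAIM (what is proved, stated in full; the proofs are below) =====
def Claim_equal_filter_prompts_py : Prop := ∀ (prompts : List String) (forbidden : List String), Dom_filter_prompts_py prompts forbidden → Spec_filter_prompts_py prompts forbidden (filter_prompts_py prompts forbidden)

-- ===== LEMMAS AND PROOFS =====

-- A's loop equals kept/removed prefixes followed by the two filters of B's dedup of the rest
theorem pvLoopA_eq (prompts forbidden : List String) :
    ∀ (kept removed : List String) (seen : PySem.Set String),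
    pvLoopA prompts forbidden kept removed seen =
      (kept ++ (pvDedupB prompts seen).filter (fun t => !forbidden.contains t),
       removed ++ (pvDedupB prompts seen).filter (fun t => forbidden.contains t)) := by
  induction prompts with
  | nil => intro kept removed seen; simp [pvLoopA, pvDedupB]
  | cons p rest ih =>
    intro kept removed seen
    simp only [pvLoopA, pvDedupB, pvNormA]
    split_ifs with h1 h2 h3 h4 h5 h6 <;> simp_all [ih]

theorem filter_prompts_py_spec : Claim_equal_filter_prompts_py := by
  intro prompts forbidden _
  unfold Spec_filter_prompts_py filter_prompts_py filter_prompts_py_alt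
  simp [pvLoopA_eq]
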